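-- pv_equiv track=rewrite | github.com/Pushks18/AlphaTrade | backend/zkml/sharpe.py | compute_sharpe_bps
-- ===== SOURCE A (Python) =====
-- from typing import List, Tuple
--
-- def _isqrt(x: int) -> int:
--     if x == 0:
--         return 0
--     z = (x + 1) // 2
--     y = x
--     while z < y:
--         y = z
--         z = (x // z + z) // 2
--     return y
--
-- def compute_sharpe_bps(outputs: List[List[int]], bars: List[List[int]]) -> Tuple[int, int]:
--     """outputs: per-bar weight vectors in bps (sum to 10_000).
--        bars:    per-bar prices (int, scaled by 1e8).
--        Returns (sharpeBps, nTrades). Single-asset simplification: the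
--        synthetic basket price is the mean over non-zero columns and the
--        weight is the mean over non-zero output columns. This matches
--        Solidity _sharpe's behavior on identical fixtures."""
--     n_bars = len(bars)
--     if n_bars < 2:
--         return (0, 0)
--
--     rets: List[int] = []
--     for i in range(n_bars - 1):
--         nz_now = [v for v in bars[i] if v != 0]
--         nz_next = [v for v in bars[i + 1] if v != 0]
--         if not nz_now or not nz_next:
--             continue
--         base = sum(nz_now) // len(nz_now)
--         nxt = sum(nz_next) // len(nz_next)
--         if base == 0:
--             continue
--         r = ((nxt - base) * 10**8) // base
--         nz_w = [w for w in outputs[i] if w != 0]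
--         if not nz_w:
--             continue
--         w = sum(nz_w) // len(nz_w)
--         rets.append((r * w) // 10_000)
--
--     if not rets:
--         return (0, 0)
--
--     n = len(rets)
--     mean = sum(rets) // n
--     sqsum = sum((x - mean) * (x - mean) for x in rets)
--     variance = sqsum // n
--     if variance == 0 or mean <= 0:
--         return (0, n)
--     stddev = _isqrt(variance)
--     return ((mean * 10_000) // stddev, n)
-- ===== SOURCE B (Python) =====
-- from typing import List, Optional, Tuple
--
-- def _isqrt(x: int) -> int:
--     if x == 0:
--         return 0
--     z = (x + 1) // 2
--     y = x
--     while z < y: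
--         y = z
--         z = (x // z + z) // 2
--     return y
--
-- def _row_mean(row: List[int]) -> Optional[int]:
--     s = 0
--     c = 0
--     for v in row:
--         if v != 0:
--             s += v
--             c += 1
--     return s // c if c else None
--
-- def _step(base: Optional[int], nxt: Optional[int], w: Optional[int]) -> Optional[int]:
--     if base is None or nxt is None or w is None or base == 0:
--         return None
--     return (((nxt - base) * 10**8) // base) * w // 10_000
--
-- def compute_sharpe_bps(outputs: List[List[int]], bars: List[List[int]]) -> Tuple[int, int]:
--     if len(bars) < 2:
--         return (0, 0)
--     # single streaming pass: carry previous bar's mean, accumulate count/sum/sum-of-squares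
--     prev = _row_mean(bars[0])
--     n = s = q = 0
--     for bar, out in zip(bars[1:], outputs):
--         cur = _row_mean(bar)
--         x = _step(prev, cur, _row_mean(out))
--         prev = cur
--         if x is not None:
--             n += 1
--             s += x
--             q += x * x
--     if n == 0:
--         return (0, 0)
--     mean = s // n
--     # variance via the exact identity sum((x-m)^2) = sum(x^2) - 2*m*sum(x) + n*m^2
--     variance = (q - 2 * mean * s + n * mean * mean) // n
--     if variance == 0 or mean <= 0:
--         return (0, n)
--     return ((mean * 10_000) // _isqrt(variance), n)
-- ===== Notes on version B (the rewrite author's own statement) =====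
-- stated objective: alternative
-- what changed: B replaces A's two-phase build-a-rets-list-then-restat design by a single streaming pass over zip(bars[1:], outputs) that carries the previous bar's mean and accumulates only (count, sum, sum-of-squares), computing the variance through the exact identity sum((x-m)^2) = sum(x^2) - 2*m*sum(x) + n*m^2 and row means by a (sum,count) fold instead of materializing filtered lists.
-- outside the precondition, e.g. on compute_sharpe_bps([], [[1], [0], [2]]): A returns (0, 0), B returns (0, 0)
import Mathlib
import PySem

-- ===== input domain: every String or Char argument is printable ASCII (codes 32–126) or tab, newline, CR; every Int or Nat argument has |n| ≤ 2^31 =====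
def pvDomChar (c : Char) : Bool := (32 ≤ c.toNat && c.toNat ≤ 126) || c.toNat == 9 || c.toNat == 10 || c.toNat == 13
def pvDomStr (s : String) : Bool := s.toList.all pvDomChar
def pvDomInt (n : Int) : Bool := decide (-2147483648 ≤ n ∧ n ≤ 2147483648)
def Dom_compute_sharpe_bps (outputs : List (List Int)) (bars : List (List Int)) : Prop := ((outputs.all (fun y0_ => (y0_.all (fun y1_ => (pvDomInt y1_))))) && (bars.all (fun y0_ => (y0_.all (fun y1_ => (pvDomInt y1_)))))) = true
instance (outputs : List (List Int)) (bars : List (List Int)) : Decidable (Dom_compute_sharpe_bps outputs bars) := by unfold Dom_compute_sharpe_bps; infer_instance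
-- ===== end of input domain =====

-- B replaces A's build-rets-list-then-restat design by one streaming pass carrying the previous
-- bar's mean and accumulating (count, sum, sum-of-squares); variance via the algebraic identity
-- Σ(x-m)² = Σx² - 2mΣx + nm². Objective: alternative decomposition, same asymptotic cost.

-- ===== PORT A =====
-- shared helper: BOTH Python files contain this identical `_isqrt` (Newton iteration).
-- The `0 < y` conjunct is a totality guard only (every reachable call has 0 < y).
def pySharpeIsqrtLoop (x z y : Int) : Int :=
  if z < y ∧ 0 < y then
    pySharpeIsqrtLoop x (PySem.Int.floordiv (PySem.Int.floordiv x z + z) 2) z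
  else y
termination_by y.toNat
decreasing_by omega

def pySharpeIsqrt (x : Int) : Int :=
  if x = 0 then 0
  else pySharpeIsqrtLoop x (PySem.Int.floordiv (x + 1) 2) x

def compute_sharpe_bps (outputs : List (List Int)) (bars : List (List Int)) : Int × Int :=
  let n_bars := bars.length
  if n_bars < 2 then (0, 0) else
  let rets := (List.range (n_bars - 1)).foldl (fun rets (i : Nat) =>
    let nz_now := ((PySem.List.pyGet? bars (i : Int)).getD []).filter (· != 0)
    let nz_next := ((PySem.List.pyGet? bars ((i : Int) + 1)).getD []).filter (· != 0)
    if nz_now = [] ∨ nz_next = [] then rets else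
    let base := PySem.Int.floordiv nz_now.sum (nz_now.length : Int)
    let nxt := PySem.Int.floordiv nz_next.sum (nz_next.length : Int)
    if base = 0 then rets else
    let r := PySem.Int.floordiv ((nxt - base) * 10 ^ 8) base
    let nz_w := ((PySem.List.pyGet? outputs (i : Int)).getD []).filter (· != 0)
    if nz_w = [] then rets else
    let w := PySem.Int.floordiv nz_w.sum (nz_w.length : Int)
    rets ++ [PySem.Int.floordiv (r * w) 10000]) []
  if rets = [] then (0, 0) else
  let n := rets.length
  let mean := PySem.Int.floordiv rets.sum (n : Int)
  let sqsum := (rets.map (fun x => (x - mean) * (x - mean))).sum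
  let variance := PySem.Int.floordiv sqsum (n : Int)
  if variance = 0 ∨ mean ≤ 0 then (0, (n : Int)) else
  let stddev := pySharpeIsqrt variance
  (PySem.Int.floordiv (mean * 10000) stddev, (n : Int))

-- ===== PORT B =====
-- `_row_mean`: single (sum, count) fold over the row, None when no nonzero entry
def sharpeRowMean (row : List Int) : Option Int :=
  let p := row.foldl (fun (sc : Int × Int) v => if v != 0 then (sc.1 + v, sc.2 + 1) else sc) (0, 0)
  if p.2 = 0 then none else some (PySem.Int.floordiv p.1 p.2)

-- `_step`
def sharpeStep (base? nxt? w? : Option Int) : Option Int :=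
  match base?, nxt?, w? with
  | some base, some nxt, some w =>
      if base = 0 then none
      else some (PySem.Int.floordiv (PySem.Int.floordiv ((nxt - base) * 10 ^ 8) base * w) 10000)
  | _, _, _ => none

def compute_sharpe_bps_alt (outputs : List (List Int)) (bars : List (List Int)) : Int × Int :=
  match bars with
  | [] => (0, 0)
  | b0 :: rest =>
    if rest = [] then (0, 0) else
    let st := (rest.zip outputs).foldl
      (fun (st : Option Int × Int × Int × Int) (pr : List Int × List Int) =>
        let cur := sharpeRowMean pr.1
        match sharpeStep st.1 cur (sharpeRowMean pr.2) with
        | none => (cur, st.2.1, st.2.2.1, st.2.2.2)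
        | some x => (cur, st.2.1 + 1, st.2.2.1 + x, st.2.2.2 + x * x))
      (sharpeRowMean b0, 0, 0, 0)
    let n := st.2.1
    if n = 0 then (0, 0) else
    let mean := PySem.Int.floordiv st.2.2.1 n
    let variance := PySem.Int.floordiv (st.2.2.2 - 2 * mean * st.2.2.1 + n * mean * mean) n
    if variance = 0 ∨ mean ≤ 0 then (0, n) else
    (PySem.Int.floordiv (mean * 10000) (pySharpeIsqrt variance), n)

-- ===== PRECONDITION & SPEC =====
-- Pre_ excludes calls where outputs has fewer rows than len(bars)-1: there Python A can raise
-- IndexError at outputs[i]; it also excludes some such inputs on which every late index is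
-- skipped and A returns (both programs then agree; cited in claim.json).
def Pre_compute_sharpe_bps (outputs : List (List Int)) (bars : List (List Int)) : Prop :=
  2 ≤ bars.length → bars.length ≤ outputs.length + 1
instance (outputs : List (List Int)) (bars : List (List Int)) : Decidable (Pre_compute_sharpe_bps outputs bars) := by unfold Pre_compute_sharpe_bps; infer_instance

def pvWitness_compute_sharpe_bps : List (List Int) × List (List Int) := ([[1]], [[1], [2]])

def Spec_compute_sharpe_bps (outputs : List (List Int)) (bars : List (List Int)) (out : Int × Int) : Prop := out = compute_sharpe_bps_alt outputs bars
instance (outputs : List (List Int)) (bars : List (List Int)) (out : Int × Int) : Decidable (Spec_compute_sharpe_bps outputs bars out) := by unfold Spec_compute_sharpe_bps; infer_instance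

-- ===== CLAIM (what is proved, stated in full; the proofs are below) =====
def Claim_equal_compute_sharpe_bps : Prop := ∀ (outputs : List (List Int)) (bars : List (List Int)), Dom_compute_sharpe_bps outputs bars → Pre_compute_sharpe_bps outputs bars → Spec_compute_sharpe_bps outputs bars (compute_sharpe_bps outputs bars)

-- ===== LEMMAS AND PROOFS =====

-- the optional per-index contribution, phrased over plain list indexing
def sharpeG (outputs bars : List (List Int)) (i : Nat) : Option Int :=
  sharpeStep (sharpeRowMean ((bars[i]?).getD []))
             (sharpeRowMean ((bars[i+1]?).getD []))
             (sharpeRowMean ((outputs[i]?).getD []))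

-- the return series as B's streaming pass sees it
def sharpeRetsZip : Option Int → List (List Int × List Int) → List Int
  | _, [] => []
  | prev, p :: tl =>
      (sharpeStep prev (sharpeRowMean p.1) (sharpeRowMean p.2)).toList
        ++ sharpeRetsZip (sharpeRowMean p.1) tl

lemma sharpeRowMean_foldl (row : List Int) : ∀ s c : Int,
    row.foldl (fun (sc : Int × Int) v => if v != 0 then (sc.1 + v, sc.2 + 1) else sc) (s, c)
      = (s + (row.filter (· != 0)).sum, c + ((row.filter (· != 0)).length : Int)) := by
  induction row with
  | nil => intro s c; simp
  | cons a tl ih =>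
      intro s c
      simp only [List.foldl_cons, List.filter_cons]
      by_cases h : a = 0
      · rw [if_neg (by simp [h])]
        simpa [h] using ih s c
      · simp only [show (a != 0) = true by simp [h], if_true, ih, List.sum_cons, List.length_cons,
          Prod.mk.injEq]
        constructor <;> push_cast <;> ring

lemma sharpeRowMean_eq (row : List Int) :
    sharpeRowMean row =
      if row.filter (· != 0) = [] then none
      else some (PySem.Int.floordiv (row.filter (· != 0)).sum ((row.filter (· != 0)).length : Int)) := by
  unfold sharpeRowMean
  rw [sharpeRowMean_foldl row 0 0]
  simp only [zero_add]
  by_cases h : row.filter (· != 0) = []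
  · simp [h]
  · have hl : ((row.filter (· != 0)).length : Int) ≠ 0 := by
      simpa using List.length_eq_zero_iff.not.mpr h
    simp [h]

-- A's append-if loop over a range equals a filterMap, given pointwise agreement of the bodies.
lemma sharpe_foldl_filterMap {α : Type} (f : List α → Nat → List α) (g : Nat → Option α)
    (l : List Nat) (hf : ∀ acc i, i ∈ l → f acc i = acc ++ (g i).toList) (acc : List α) :
    l.foldl f acc = acc ++ l.filterMap g := by
  induction l generalizing acc with
  | nil => simp
  | cons x xs ih =>
      simp only [List.foldl_cons, List.filterMap_cons]
      rw [hf acc x (by simp), ih (fun a i hi => hf a i (by simp [hi]))]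
      cases g x <;> simp


-- shift lemma: dropping the head rows shifts sharpeG's index by one
lemma sharpeG_succ (o0 : List Int) (os' : List (List Int)) (b0 : List Int)
    (bs' : List (List Int)) (i : Nat) :
    sharpeG (o0 :: os') (b0 :: bs') (i + 1) = sharpeG os' bs' i := by
  simp [sharpeG]

lemma sharpe_range_eq_zip (rest : List (List Int)) : ∀ (os : List (List Int)) (b0 : List Int),
    rest.length ≤ os.length →
    (List.range rest.length).filterMap (sharpeG os (b0 :: rest))
      = sharpeRetsZip (sharpeRowMean b0) (rest.zip os) := by
  induction rest with
  | nil => intro os b0 _; simp [sharpeRetsZip]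
  | cons b1 rest' ih =>
      intro os b0 h
      cases os with
      | nil => simp at h
      | cons o0 os' =>
          simp only [List.length_cons]
          rw [List.range_succ_eq_map]
          simp only [List.filterMap_cons, List.filterMap_map]
          have hshift : (sharpeG (o0 :: os') (b0 :: b1 :: rest')) ∘ Nat.succ
              = sharpeG os' (b1 :: rest') := by
            funext i; exact sharpeG_succ o0 os' b0 (b1 :: rest') i
          have hg0 : sharpeG (o0 :: os') (b0 :: b1 :: rest') 0
              = sharpeStep (sharpeRowMean b0) (sharpeRowMean b1) (sharpeRowMean o0) := by
            simp [sharpeG]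
          rw [hg0, hshift, ih os' b1 (by simpa using h)]
          simp only [List.zip_cons_cons, sharpeRetsZip]
          cases sharpeStep (sharpeRowMean b0) (sharpeRowMean b1) (sharpeRowMean o0) <;> simp

-- B's streaming fold computes (count, sum, sum of squares) of the return series
lemma sharpe_fold_stats (pairs : List (List Int × List Int)) :
    ∀ (prev : Option Int) (n s q : Int),
    pairs.foldl (fun (st : Option Int × Int × Int × Int) (pr : List Int × List Int) =>
        let cur := sharpeRowMean pr.1
        match sharpeStep st.1 cur (sharpeRowMean pr.2) with
        | none => (cur, st.2.1, st.2.2.1, st.2.2.2)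
        | some x => (cur, st.2.1 + 1, st.2.2.1 + x, st.2.2.2 + x * x))
      (prev, n, s, q)
    = (pairs.foldl (fun _ pr => sharpeRowMean pr.1) prev,
       n + ((sharpeRetsZip prev pairs).length : Int),
       s + (sharpeRetsZip prev pairs).sum,
       q + ((sharpeRetsZip prev pairs).map (fun x => x * x)).sum) := by
  induction pairs with
  | nil => intro prev n s q; simp [sharpeRetsZip]
  | cons p tl ih =>
      intro prev n s q
      simp only [List.foldl_cons]
      cases hstep : sharpeStep prev (sharpeRowMean p.1) (sharpeRowMean p.2) with
      | none =>
          simp only [hstep, sharpeRetsZip, Option.toList_none, List.nil_append]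
          exact ih (sharpeRowMean p.1) n s q
      | some x =>
          simp only [hstep, sharpeRetsZip, Option.toList_some, List.singleton_append]
          rw [ih (sharpeRowMean p.1) (n + 1) (s + x) (q + x * x)]
          simp only [Prod.mk.injEq, List.length_cons, List.sum_cons, List.map_cons, true_and]
          refine ⟨by push_cast; ring, by ring, by ring⟩

-- exact integer identity behind B's one-pass variance
lemma sharpe_sq_sum (l : List Int) (m : Int) :
    (l.map (fun x => (x - m) * (x - m))).sum
      = (l.map (fun x => x * x)).sum - 2 * m * l.sum + (l.length : Int) * m * m := by
  induction l with
  | nil => simp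
  | cons a tl ih =>
      simp only [List.map_cons, List.sum_cons, List.length_cons, ih]
      push_cast; ring

theorem compute_sharpe_bps_spec_aux (outputs : List (List Int)) (bars : List (List Int))
    (hpre : Pre_compute_sharpe_bps outputs bars) :
    compute_sharpe_bps outputs bars = compute_sharpe_bps_alt outputs bars := by
  match bars with
  | [] => rfl
  | [b0] => rfl
  | b0 :: b1 :: rest =>
    unfold compute_sharpe_bps compute_sharpe_bps_alt
    have hlen : ¬ ((b0 :: b1 :: rest).length < 2) := by simp
    have hne : ¬ (b1 :: rest = ([] : List (List Int))) := by simp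
    simp only [hlen, if_false, hne]
    have hout : (b1 :: rest).length ≤ outputs.length := by
      have := hpre (by simp); simpa using this
    -- A's loop = filterMap sharpeG over the index range
    have hrets :
        (List.range ((b0 :: b1 :: rest).length - 1)).foldl (fun rets (i : Nat) =>
          let nz_now := ((PySem.List.pyGet? (b0 :: b1 :: rest) (i : Int)).getD []).filter (· != 0)
          let nz_next := ((PySem.List.pyGet? (b0 :: b1 :: rest) ((i : Int) + 1)).getD []).filter (· != 0)
          if nz_now = [] ∨ nz_next = [] then rets else
          let base := PySem.Int.floordiv nz_now.sum (nz_now.length : Int)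
          let nxt := PySem.Int.floordiv nz_next.sum (nz_next.length : Int)
          if base = 0 then rets else
          let r := PySem.Int.floordiv ((nxt - base) * 10 ^ 8) base
          let nz_w := ((PySem.List.pyGet? outputs (i : Int)).getD []).filter (· != 0)
          if nz_w = [] then rets else
          let w := PySem.Int.floordiv nz_w.sum (nz_w.length : Int)
          rets ++ [PySem.Int.floordiv (r * w) 10000]) []
        = (List.range ((b0 :: b1 :: rest).length - 1)).filterMap
            (sharpeG outputs (b0 :: b1 :: rest)) := by
      apply sharpe_foldl_filterMap
      intro acc i _
      have hcast : ((i : Int) + 1) = ((i + 1 : Nat) : Int) := by push_cast; ring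
      rw [PySem.List.pyGet?_natCast, hcast, PySem.List.pyGet?_natCast,
        PySem.List.pyGet?_natCast]
      unfold sharpeG
      rw [sharpeRowMean_eq, sharpeRowMean_eq, sharpeRowMean_eq]
      set nowRow := ((b0 :: b1 :: rest)[i]?).getD [] with hnow
      set nxtRow := ((b0 :: b1 :: rest)[i+1]?).getD [] with hnxt
      set wRow := (outputs[i]?).getD [] with hw
      by_cases e1 : nowRow.filter (· != 0) = []
      · simp [e1, sharpeStep]
      · by_cases e2 : nxtRow.filter (· != 0) = []
        · simp [e1, e2, sharpeStep]
        · simp only [e1, e2, if_false, or_self]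
          by_cases e3 : PySem.Int.floordiv (nowRow.filter (· != 0)).sum
              ((nowRow.filter (· != 0)).length : Int) = 0
          · by_cases e4 : wRow.filter (· != 0) = []
            · simp [e3, e4, sharpeStep]
            · simp [e3, e4, sharpeStep]
          · by_cases e4 : wRow.filter (· != 0) = []
            · simp [e3, e4, sharpeStep]
            · simp [e3, e4, sharpeStep]
    rw [hrets]
    have hlen1 : (b0 :: b1 :: rest).length - 1 = (b1 :: rest).length := by simp
    rw [hlen1, sharpe_range_eq_zip (b1 :: rest) outputs b0 hout]
    rw [sharpe_fold_stats ((b1 :: rest).zip outputs) (sharpeRowMean b0) 0 0 0]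
    simp only [zero_add]
    set R := sharpeRetsZip (sharpeRowMean b0) ((b1 :: rest).zip outputs) with hR
    by_cases hRnil : R = []
    · simp [hRnil]
    · have hn0 : ((R.length : Int) = 0) = False := by
        simp [List.length_eq_zero_iff, hRnil]
      simp only [hRnil, if_false, hn0]
      rw [sharpe_sq_sum R (PySem.Int.floordiv R.sum (R.length : Int))]

-- ===== VERDICT (by name: the statement is the Claim_ definition above) =====
theorem compute_sharpe_bps_spec : Claim_equal_compute_sharpe_bps := by
  intro outputs bars _ hpre
  unfold Spec_compute_sharpe_bps
  exact compute_sharpe_bps_spec_aux outputs bars hpre
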